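-- pv_equiv track=rewrite | github.com/posl/comment_recommendation | script/mod_gen/2_time/zh/179_D/6.py | f
-- ===== SOURCE A (Python) =====
-- def f(n,k,ls):
--     dp=[0]*(n+1)
--     dp[1]=1
--     for i in range(2,n+1):
--         for j in range(k):
--             if i-ls[j][0]>=0:
--                 dp[i]+=dp[i-ls[j][0]]
--                 dp[i]%=998244353
--             if i-ls[j][1]-1>=0:
--                 dp[i]-=dp[i-ls[j][1]-1]
--                 dp[i]%=998244353
--     return dp[n]
-- ===== SOURCE B (Python) =====
-- def f(n, k, ls):
--     # Forward scatter instead of backward gather: each finalized dp value is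
--     # broadcast (via += / -=) to the future indices it will contribute to.
--     MOD = 998244353
--     segs = [ls[j] for j in range(k)]
--     acc = [0] * (n + 1)
--     cur = 0
--     for i in range(1, n + 1):
--         cur = 1 if i == 1 else acc[i] % MOD
--         for l, r in segs:
--             if i + l <= n:
--                 acc[i + l] += cur
--             t = i + r + 1
--             if t <= n:
--                 acc[t] -= cur
--     return cur
-- ===== Notes on version B (the rewrite author's own statement) =====
-- stated objective: alternative
-- what changed: Backward gather (each dp[i] sums dp[i-l]..-dp[i-r-1] over all segments) is replaced by a forward scatter: a difference-style accumulator array into which each finalized dp value is pushed (+= at i+l, -= at i+r+1), so dp[i] is read off as acc[i] % p with a single mod per cell. Pre_ excludes self-referential segments (l = 0 or r = -1), where A's result depends on reading the partially accumulated dp[i] in its inner-loop order, and n<=1-or-raising corners (n <= 0, k > len(ls), negative offsets) where A raises or only returns because its loop body never runs.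
-- outside the precondition, e.g. on f(7, 3, [(1, 1), (0, 4), (0, 4)]): A returns 424, B returns 998244350; on f(3, 3, [(1, 1), (1, -1), (2, 3)]): A returns 1, B returns 4; on f(1, 2, []): A returns 1, B raises IndexError
import Mathlib
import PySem

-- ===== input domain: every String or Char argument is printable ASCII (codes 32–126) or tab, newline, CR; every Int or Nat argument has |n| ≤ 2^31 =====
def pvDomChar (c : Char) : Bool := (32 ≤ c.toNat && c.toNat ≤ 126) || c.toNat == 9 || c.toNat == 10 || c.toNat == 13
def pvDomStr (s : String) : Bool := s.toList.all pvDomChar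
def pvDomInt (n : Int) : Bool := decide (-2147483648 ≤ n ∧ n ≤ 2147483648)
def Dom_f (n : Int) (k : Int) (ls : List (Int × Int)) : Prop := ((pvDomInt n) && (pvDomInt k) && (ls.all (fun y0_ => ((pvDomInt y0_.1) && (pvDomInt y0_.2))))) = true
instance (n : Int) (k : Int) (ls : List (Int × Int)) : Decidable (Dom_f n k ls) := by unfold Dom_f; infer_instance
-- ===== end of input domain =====

-- B replaces A's backward gather by a forward scatter through a difference-style
-- accumulator array (alternative decomposition, same cost).

-- ===== PORT A =====
-- inner-loop body of A: the two guarded 'dp[i] ±= dp[...]; dp[i] %= p' updates for one segment p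
def fInner (i : Int) (dp : List Int) (p : Int × Int) : List Int :=
  let dp := if i - p.1 ≥ 0 then
      PySem.List.pySetD dp i (PySem.Int.mod (PySem.List.pyGetD dp i 0 + PySem.List.pyGetD dp (i - p.1) 0) 998244353)
    else dp
  if i - p.2 - 1 ≥ 0 then
      PySem.List.pySetD dp i (PySem.Int.mod (PySem.List.pyGetD dp i 0 - PySem.List.pyGetD dp (i - p.2 - 1) 0) 998244353)
    else dp

def f (n : Int) (k : Int) (ls : List (Int × Int)) : Int :=
  let dp : List Int := List.replicate (n + 1).toNat 0
  let dp := PySem.List.pySetD dp 1 1      -- dp[1] = 1 (IndexError when n ≤ 0: excluded by Pre_)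
  let dp := (PySem.List.pyRange 2 (n + 1) 1).foldl (fun dp i =>
      (PySem.List.pyRange 0 k 1).foldl (fun dp j =>
        fInner i dp (PySem.List.pyGetD ls j (0, 0))) dp) dp
  PySem.List.pyGetD dp n 0

-- ===== PORT B =====
-- inner-loop body of B: scatter the finalized value cur of position i forward
def fScat (n : Int) (i : Int) (cur : Int) (acc : List Int) (p : Int × Int) : List Int :=
  let acc := if i + p.1 ≤ n then
      PySem.List.pySetD acc (i + p.1) (PySem.List.pyGetD acc (i + p.1) 0 + cur)
    else acc
  let t := i + p.2 + 1
  if t ≤ n then PySem.List.pySetD acc t (PySem.List.pyGetD acc t 0 - cur) else acc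

def f_alt (n : Int) (k : Int) (ls : List (Int × Int)) : Int :=
  let segs := (PySem.List.pyRange 0 k 1).map (fun j => PySem.List.pyGetD ls j (0, 0))
  let st := (PySem.List.pyRange 1 (n + 1) 1).foldl (fun (st : List Int × Int) i =>
      let cur := if i = 1 then 1 else PySem.Int.mod (PySem.List.pyGetD st.1 i 0) 998244353
      (segs.foldl (fScat n i cur) st.1, cur))
    (List.replicate (n + 1).toNat 0, 0)
  st.2

-- ===== PRECONDITION & SPEC =====
-- Pre_ excludes: self-referential segments (l = 0 or r = -1), where A's value comes from
-- reading the partially accumulated dp[i] in inner-loop order (an artefact of its traversal);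
-- n ≤ 0, where A raises IndexError; out-of-range or negative-offset segments, where A raises;
-- and n = 1 inputs with such bad k/segments, which A only returns on because its loop body never runs.
def Pre_f (n : Int) (k : Int) (ls : List (Int × Int)) : Prop :=
  1 ≤ n ∧ k ≤ (ls.length : Int) ∧ ∀ p ∈ ls.take k.toNat, 1 ≤ p.1 ∧ 0 ≤ p.2
instance (n : Int) (k : Int) (ls : List (Int × Int)) : Decidable (Pre_f n k ls) := by
  unfold Pre_f; infer_instance
def pvWitness_f : Int × Int × (List (Int × Int)) := (6, 2, [(1, 2), (2, 3)])

def Spec_f (n : Int) (k : Int) (ls : List (Int × Int)) (out : Int) : Prop := out = f_alt n k ls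
instance (n : Int) (k : Int) (ls : List (Int × Int)) (out : Int) : Decidable (Spec_f n k ls out) := by unfold Spec_f; infer_instance

-- ===== CLAIM (what is proved, stated in full; the proofs are below) =====
def Claim_equal_f : Prop := ∀ (n : Int) (k : Int) (ls : List (Int × Int)), Dom_f n k ls → Pre_f n k ls → Spec_f n k ls (f n k ls)
-- ===== LEMMAS AND PROOFS =====

-- proof-side abbreviations for the two evolving states
def AStep (segs : List (Int × Int)) (dp : List Int) (i : Int) : List Int :=
  segs.foldl (fInner i) dp
def AState (n : Int) (segs : List (Int × Int)) (m : Int) : List Int :=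
  (PySem.List.pyRange 2 m 1).foldl (AStep segs)
    (PySem.List.pySetD (List.replicate (n + 1).toNat 0) 1 1)
def BStep (n : Int) (segs : List (Int × Int)) (st : List Int × Int) (i : Int) : List Int × Int :=
  let cur := if i = 1 then 1 else PySem.Int.mod (PySem.List.pyGetD st.1 i 0) 998244353
  (segs.foldl (fScat n i cur) st.1, cur)
def BState (n : Int) (segs : List (Int × Int)) (m : Int) : List Int × Int :=
  (PySem.List.pyRange 1 m 1).foldl (BStep n segs) (List.replicate (n + 1).toNat 0, 0)

-- term read by A's gather at row t (guards as in A, indices may hit 0)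
def gTerm (dp : List Int) (t : Int) (p : Int × Int) : Int :=
  (if 0 ≤ t - p.1 then dp.getD (t - p.1).toNat 0 else 0) -
  (if 0 ≤ t - p.2 - 1 then dp.getD (t - p.2 - 1).toNat 0 else 0)
-- part of that sum already delivered by sources 1..m-1
def rTerm (dp : List Int) (t m : Int) (p : Int × Int) : Int :=
  (if 1 ≤ t - p.1 ∧ t - p.1 < m then dp.getD (t - p.1).toNat 0 else 0) -
  (if 1 ≤ t - p.2 - 1 ∧ t - p.2 - 1 < m then dp.getD (t - p.2 - 1).toNat 0 else 0)
-- contribution scattered from source m with value cur to row t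
def sTerm (m cur t : Int) (p : Int × Int) : Int :=
  (if t = m + p.1 then cur else 0) - (if t = m + p.2 + 1 then cur else 0)


theorem pyGetD0 (xs : List Int) (i : Int) (h : 0 ≤ i) :
    PySem.List.pyGetD xs i 0 = xs.getD i.toNat 0 := by
  obtain ⟨j, rfl⟩ := Int.eq_ofNat_of_zero_le h
  simp [PySem.List.pyGetD_natCast]

theorem getD_set_self (xs : List Int) (j : Nat) (v : Int) (h : j < xs.length) :
    (xs.set j v).getD j 0 = v := by
  simp [List.getD_eq_getElem?_getD, h]

theorem getD_set_of_ne (xs : List Int) (j t : Nat) (v : Int) (h : t ≠ j) :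
    (xs.set j v).getD t 0 = xs.getD t 0 := by
  simp [List.getD_eq_getElem?_getD, Ne.symm h]

theorem getD_replicate_zero (n : Nat) (t : Nat) : (List.replicate n (0 : Int)).getD t 0 = 0 := by
  by_cases h : t < n
  · simp [List.getD_eq_getElem?_getD, h]
  · have hl : (List.replicate n (0 : Int)).length ≤ t := by simpa using Nat.le_of_not_lt h
    simp [List.getD_eq_getElem?_getD, List.getElem?_eq_none hl]

theorem emod_add_left (x y : Int) : (x % 998244353 + y) % 998244353 = (x + y) % 998244353 := by
  conv_lhs => rw [Int.add_emod, Int.emod_emod_of_dvd _ dvd_rfl, ← Int.add_emod]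

theorem emod_sub_left (x y : Int) : (x % 998244353 - y) % 998244353 = (x - y) % 998244353 := by
  conv_lhs => rw [Int.sub_emod, Int.emod_emod_of_dvd _ dvd_rfl, ← Int.sub_emod]

theorem seg_map (k : Int) (ls : List (Int × Int)) (hk : k ≤ (ls.length : Int)) :
    (PySem.List.pyRange 0 k 1).map (fun j => PySem.List.pyGetD ls j ((0 : Int), (0 : Int))) = ls.take k.toNat := by
  by_cases h : k ≤ 0
  · rw [PySem.List.pyRange_one_eq_nil h, show k.toNat = 0 by omega]
    simp
  · rw [not_le] at h
    obtain ⟨K, hK⟩ : ∃ K : Nat, k = (K : Int) := ⟨k.toNat, by omega⟩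
    subst hK
    rw [PySem.List.pyRange_zero_nat, List.map_map]
    apply List.ext_getElem
    · simp; omega
    · intro i h1 h2
      simp only [List.getElem_map, List.getElem_range, Function.comp]
      rw [PySem.List.pyGetD_natCast]
      have hi : i < ls.length := by simp at h2; omega
      rw [List.getElem_take, List.getD_eq_getElem?_getD, List.getElem?_eq_getElem hi]
      simp

theorem f_eq_AState (n k : Int) (ls : List (Int × Int)) (hk : k ≤ (ls.length : Int)) :
    f n k ls = PySem.List.pyGetD (AState n (ls.take k.toNat) (n + 1)) n 0 := by
  rw [← seg_map k ls hk]
  have h : AStep (List.map (fun j => PySem.List.pyGetD ls j ((0 : Int), (0 : Int))) (PySem.List.pyRange 0 k 1)) =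
      fun dp i => List.foldl (fun dp j => fInner i dp (PySem.List.pyGetD ls j (0, 0))) dp (PySem.List.pyRange 0 k 1) := by
    funext dp i
    simp only [AStep, List.foldl_map]
  simp only [f, AState, h]

theorem f_alt_eq_BState (n k : Int) (ls : List (Int × Int)) (hk : k ≤ (ls.length : Int)) :
    f_alt n k ls = (BState n (ls.take k.toNat) (n + 1)).2 := by
  rw [← seg_map k ls hk]
  have h : BStep n (List.map (fun j => PySem.List.pyGetD ls j ((0 : Int), (0 : Int))) (PySem.List.pyRange 0 k 1)) =
      fun st i =>
        (List.foldl (fScat n i (if i = 1 then 1 else PySem.Int.mod (PySem.List.pyGetD st.1 i 0) 998244353)) st.1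
            (List.map (fun j => PySem.List.pyGetD ls j (0, 0)) (PySem.List.pyRange 0 k 1)),
          if i = 1 then 1 else PySem.Int.mod (PySem.List.pyGetD st.1 i 0) 998244353) := by
    funext st i
    simp only [BStep]
  simp only [f_alt, BState, h]


theorem gTerm_congr (dp dp' : List Int) (i : Int) (hi : 2 ≤ i)
    (hagree : ∀ t : Nat, t ≠ i.toNat → dp'.getD t 0 = dp.getD t 0)
    (p : Int × Int) (hp1 : 1 ≤ p.1) (hp2 : 0 ≤ p.2) :
    gTerm dp' i p = gTerm dp i p := by
  unfold gTerm
  have e1 : (if 0 ≤ i - p.1 then dp'.getD (i - p.1).toNat 0 else 0) =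
      (if 0 ≤ i - p.1 then dp.getD (i - p.1).toNat 0 else 0) := by
    split_ifs with h
    · exact hagree _ (by omega)
    · rfl
  have e2 : (if 0 ≤ i - p.2 - 1 then dp'.getD (i - p.2 - 1).toNat 0 else 0) =
      (if 0 ≤ i - p.2 - 1 then dp.getD (i - p.2 - 1).toNat 0 else 0) := by
    split_ifs with h
    · exact hagree _ (by omega)
    · rfl
  rw [e1, e2]

theorem fInner_spec (i : Int) (dp : List Int) (p : Int × Int)
    (hp1 : 1 ≤ p.1) (hp2 : 0 ≤ p.2) (hi : 2 ≤ i) (hlen : i.toNat < dp.length)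
    (h0 : 0 ≤ dp.getD i.toNat 0) (hM : dp.getD i.toNat 0 < 998244353) :
    (fInner i dp p).length = dp.length ∧
    (∀ t : Nat, t ≠ i.toNat → (fInner i dp p).getD t 0 = dp.getD t 0) ∧
    (fInner i dp p).getD i.toNat 0 = (dp.getD i.toNat 0 + gTerm dp i p) % 998244353 ∧
    0 ≤ (fInner i dp p).getD i.toNat 0 ∧ (fInner i dp p).getD i.toNat 0 < 998244353 := by
  have h0i : (0 : Int) ≤ i := by omega
  have hMpos : (0 : Int) < 998244353 := by norm_num
  have hset : ∀ (xs : List Int) (v : Int), PySem.List.pySetD xs i v = xs.set i.toNat v :=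
    fun xs v => PySem.List.pySetD_of_nonneg xs v h0i
  have gI : ∀ xs : List Int, PySem.List.pyGetD xs i 0 = xs.getD i.toNat 0 :=
    fun xs => pyGetD0 xs i h0i
  unfold fInner gTerm
  by_cases hg1 : i - p.1 ≥ 0 <;> by_cases hg2 : i - p.2 - 1 ≥ 0
  · -- both guards fire
    have r1 : ∀ xs : List Int, PySem.List.pyGetD xs (i - p.1) 0 = xs.getD (i - p.1).toNat 0 :=
      fun xs => pyGetD0 _ _ (by omega)
    have r2 : ∀ xs : List Int, PySem.List.pyGetD xs (i - p.2 - 1) 0 = xs.getD (i - p.2 - 1).toNat 0 :=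
      fun xs => pyGetD0 _ _ (by omega)
    have hne1 : (i - p.1).toNat ≠ i.toNat := by omega
    have hne2 : (i - p.2 - 1).toNat ≠ i.toNat := by omega
    simp only [if_pos hg1, if_pos hg2, hset, gI, r1, r2,
      PySem.Int.mod_eq_emod_of_pos hMpos, List.length_set]
    rw [getD_set_self _ _ _ hlen, getD_set_of_ne _ _ _ _ hne2,
        getD_set_self _ _ _ (by simpa using hlen)]
    refine ⟨trivial, fun t ht => by rw [getD_set_of_ne _ _ _ _ ht, getD_set_of_ne _ _ _ _ ht], ?_, ?_, ?_⟩
    · rw [emod_sub_left]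
      congr 1
      ring
    · exact Int.emod_nonneg _ (by norm_num)
    · exact Int.emod_lt_of_pos _ hMpos
  · -- only the first fires
    have r1 : ∀ xs : List Int, PySem.List.pyGetD xs (i - p.1) 0 = xs.getD (i - p.1).toNat 0 :=
      fun xs => pyGetD0 _ _ (by omega)
    simp only [if_pos hg1, if_neg hg2, hset, gI, r1,
      PySem.Int.mod_eq_emod_of_pos hMpos, List.length_set]
    rw [getD_set_self _ _ _ hlen]
    refine ⟨trivial, fun t ht => by rw [getD_set_of_ne _ _ _ _ ht], ?_, ?_, ?_⟩
    · congr 1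
      ring
    · exact Int.emod_nonneg _ (by norm_num)
    · exact Int.emod_lt_of_pos _ hMpos
  · -- only the second fires
    have r2 : ∀ xs : List Int, PySem.List.pyGetD xs (i - p.2 - 1) 0 = xs.getD (i - p.2 - 1).toNat 0 :=
      fun xs => pyGetD0 _ _ (by omega)
    simp only [if_neg hg1, if_pos hg2, hset, gI, r2,
      PySem.Int.mod_eq_emod_of_pos hMpos, List.length_set]
    rw [getD_set_self _ _ _ hlen]
    refine ⟨trivial, fun t ht => by rw [getD_set_of_ne _ _ _ _ ht], ?_, ?_, ?_⟩
    · congr 1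
      ring
    · exact Int.emod_nonneg _ (by norm_num)
    · exact Int.emod_lt_of_pos _ hMpos
  · -- neither fires
    simp only [if_neg hg1, if_neg hg2]
    refine ⟨trivial, fun t ht => trivial, ?_, h0, hM⟩
    have h : dp.getD i.toNat 0 + (0 - 0) = dp.getD i.toNat 0 := by ring
    rw [h, Int.emod_eq_of_lt h0 hM]

theorem AStep_spec (i : Int) (segs : List (Int × Int)) :
    ∀ (dp : List Int), (∀ p ∈ segs, 1 ≤ p.1 ∧ 0 ≤ p.2) → 2 ≤ i → i.toNat < dp.length →
    0 ≤ dp.getD i.toNat 0 → dp.getD i.toNat 0 < 998244353 →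
    (AStep segs dp i).length = dp.length ∧
    (∀ t : Nat, t ≠ i.toNat → (AStep segs dp i).getD t 0 = dp.getD t 0) ∧
    (AStep segs dp i).getD i.toNat 0 =
      (dp.getD i.toNat 0 + (segs.map (gTerm dp i)).sum) % 998244353 := by
  induction segs with
  | nil =>
    intro dp hs hi hlen h0 hM
    exact ⟨rfl, fun t ht => rfl, by simpa using (Int.emod_eq_of_lt h0 hM).symm⟩
  | cons p segs ih =>
    intro dp hs hi hlen h0 hM
    obtain ⟨hp1, hp2⟩ := hs p List.mem_cons_self
    have hs' : ∀ q ∈ segs, 1 ≤ q.1 ∧ 0 ≤ q.2 := fun q hq => hs q (List.mem_cons_of_mem _ hq)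
    obtain ⟨hl1, hag1, hval1, hb1, hb2⟩ := fInner_spec i dp p hp1 hp2 hi hlen h0 hM
    obtain ⟨hl2, hag2, hval2⟩ := ih (fInner i dp p) hs' hi (hl1 ▸ hlen) hb1 hb2
    have hAS : AStep (p :: segs) dp i = AStep segs (fInner i dp p) i := rfl
    refine ⟨by rw [hAS, hl2, hl1], fun t ht => by rw [hAS, hag2 t ht, hag1 t ht], ?_⟩
    rw [hAS, hval2, hval1, emod_add_left]
    have hmap : (segs.map (gTerm (fInner i dp p) i)).sum = (segs.map (gTerm dp i)).sum := by
      apply congrArg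
      apply List.map_congr_left
      intro q hq
      exact gTerm_congr dp (fInner i dp p) i hi hag1 q (hs' q hq).1 (hs' q hq).2
    rw [hmap, List.map_cons, List.sum_cons]
    congr 1
    ring


theorem fScat_spec (n i cur : Int) (acc : List Int) (p : Int × Int)
    (hp1 : 1 ≤ p.1) (hp2 : 0 ≤ p.2) (hi : 1 ≤ i) (hn : 1 ≤ n)
    (hlen : acc.length = (n + 1).toNat) :
    (fScat n i cur acc p).length = acc.length ∧
    ∀ t : Int, 0 ≤ t → t ≤ n →
      (fScat n i cur acc p).getD t.toNat 0 = acc.getD t.toNat 0 + sTerm i cur t p := by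
  have hs1 : (0 : Int) ≤ i + p.1 := by omega
  have hs2 : (0 : Int) ≤ i + p.2 + 1 := by omega
  unfold fScat sTerm
  by_cases hg1 : i + p.1 ≤ n <;> by_cases hg2 : i + p.2 + 1 ≤ n <;>
    simp only [if_pos, hg1, hg2, ite_false,
      PySem.List.pySetD_of_nonneg _ _ hs1, PySem.List.pySetD_of_nonneg _ _ hs2,
      pyGetD0 _ _ hs1, pyGetD0 _ _ hs2, List.length_set]
  · -- both targets in range
    have hl1 : (i + p.1).toNat < acc.length := by omega
    have hl2 : (i + p.2 + 1).toNat < acc.length := by omega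
    refine ⟨trivial, fun t ht0 htn => ?_⟩
    by_cases ht2 : t = i + p.2 + 1
    · have : t.toNat = (i + p.2 + 1).toNat := by omega
      rw [this, getD_set_self _ _ _ (by simpa using hl2)]
      by_cases ht1 : t = i + p.1
      · have e : (i + p.2 + 1).toNat = (i + p.1).toNat := by omega
        rw [e, getD_set_self _ _ _ hl1, if_pos ht1, if_pos ht2]
        have e2 : acc.getD (i + p.1).toNat 0 = acc.getD t.toNat 0 := by
          congr 1; omega
        rw [e2]; ring
      · have e : (i + p.2 + 1).toNat ≠ (i + p.1).toNat := by omega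
        rw [getD_set_of_ne _ _ _ _ e, if_neg ht1, if_pos ht2]
        have e2 : acc.getD (i + p.2 + 1).toNat 0 = acc.getD t.toNat 0 := by
          congr 1; omega
        rw [e2]; ring
    · have hne2 : t.toNat ≠ (i + p.2 + 1).toNat := by omega
      rw [getD_set_of_ne _ _ _ _ hne2]
      by_cases ht1 : t = i + p.1
      · have : t.toNat = (i + p.1).toNat := by omega
        rw [this, getD_set_self _ _ _ hl1, if_pos ht1, if_neg ht2]
        have e2 : acc.getD (i + p.1).toNat 0 = acc.getD t.toNat 0 := by
          congr 1; omega
        rw [e2]; ring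
      · have hne1 : t.toNat ≠ (i + p.1).toNat := by omega
        rw [getD_set_of_ne _ _ _ _ hne1, if_neg ht1, if_neg ht2]
        ring
  · -- only the first target in range
    have hl1 : (i + p.1).toNat < acc.length := by omega
    refine ⟨trivial, fun t ht0 htn => ?_⟩
    by_cases ht1 : t = i + p.1
    · have : t.toNat = (i + p.1).toNat := by omega
      rw [this, getD_set_self _ _ _ hl1, if_pos ht1, if_neg (by omega : ¬ t = i + p.2 + 1)]
      have e2 : acc.getD (i + p.1).toNat 0 = acc.getD t.toNat 0 := by
        congr 1; omega
      rw [e2]; ring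
    · have hne1 : t.toNat ≠ (i + p.1).toNat := by omega
      rw [getD_set_of_ne _ _ _ _ hne1, if_neg ht1, if_neg (by omega : ¬ t = i + p.2 + 1)]
      ring
  · -- only the second target in range
    have hl2 : (i + p.2 + 1).toNat < acc.length := by omega
    refine ⟨trivial, fun t ht0 htn => ?_⟩
    by_cases ht2 : t = i + p.2 + 1
    · have : t.toNat = (i + p.2 + 1).toNat := by omega
      rw [this, getD_set_self _ _ _ hl2, if_neg (by omega : ¬ t = i + p.1), if_pos ht2]
      have e2 : acc.getD (i + p.2 + 1).toNat 0 = acc.getD t.toNat 0 := by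
        congr 1; omega
      rw [e2]; ring
    · have hne2 : t.toNat ≠ (i + p.2 + 1).toNat := by omega
      rw [getD_set_of_ne _ _ _ _ hne2, if_neg (by omega : ¬ t = i + p.1), if_neg ht2]
      ring
  · -- neither target in range
    refine ⟨trivial, fun t ht0 htn => ?_⟩
    rw [if_neg (by omega : ¬ t = i + p.1), if_neg (by omega : ¬ t = i + p.2 + 1)]
    ring

theorem BScat_spec (n i cur : Int) (segs : List (Int × Int)) :
    ∀ acc : List Int, (∀ p ∈ segs, 1 ≤ p.1 ∧ 0 ≤ p.2) → 1 ≤ i → 1 ≤ n →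
    acc.length = (n + 1).toNat →
    (segs.foldl (fScat n i cur) acc).length = acc.length ∧
    ∀ t : Int, 0 ≤ t → t ≤ n →
      (segs.foldl (fScat n i cur) acc).getD t.toNat 0 =
        acc.getD t.toNat 0 + (segs.map (sTerm i cur t)).sum := by
  induction segs with
  | nil =>
    intro acc hs hi hn hlen
    exact ⟨rfl, fun t ht0 htn => by simp⟩
  | cons p segs ih =>
    intro acc hs hi hn hlen
    obtain ⟨hp1, hp2⟩ := hs p List.mem_cons_self
    have hs' : ∀ q ∈ segs, 1 ≤ q.1 ∧ 0 ≤ q.2 := fun q hq => hs q (List.mem_cons_of_mem _ hq)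
    obtain ⟨hl1, hv1⟩ := fScat_spec n i cur acc p hp1 hp2 hi hn hlen
    obtain ⟨hl2, hv2⟩ := ih (fScat n i cur acc p) hs' hi hn (by rw [hl1, hlen])
    have hF : (p :: segs).foldl (fScat n i cur) acc = segs.foldl (fScat n i cur) (fScat n i cur acc p) := rfl
    refine ⟨by rw [hF, hl2, hl1], fun t ht0 htn => ?_⟩
    rw [hF, hv2 t ht0 htn, hv1 t ht0 htn, List.map_cons, List.sum_cons]
    ring


theorem rsum_eq_gsum (segs : List (Int × Int)) (dp : List Int) (t : Int)
    (hs : ∀ p ∈ segs, 1 ≤ p.1 ∧ 0 ≤ p.2) (h0 : dp.getD 0 0 = 0) :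
    (segs.map (rTerm dp t t)).sum = (segs.map (gTerm dp t)).sum := by
  apply congrArg
  apply List.map_congr_left
  intro p hp
  obtain ⟨hp1, hp2⟩ := hs p hp
  unfold rTerm gTerm
  congr 1
  · rcases lt_trichotomy (t - p.1) 0 with h | h | h
    · rw [if_neg (by omega), if_neg (by omega)]
    · rw [if_neg (by omega), if_pos (by omega)]
      rw [show (t - p.1).toNat = 0 by omega, h0]
    · rw [if_pos (by omega), if_pos (by omega)]
  · rcases lt_trichotomy (t - p.2 - 1) 0 with h | h | h
    · rw [if_neg (by omega), if_neg (by omega)]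
    · rw [if_neg (by omega), if_pos (by omega)]
      rw [show (t - p.2 - 1).toNat = 0 by omega, h0]
    · rw [if_pos (by omega), if_pos (by omega)]

theorem rsum_step (segs : List (Int × Int)) (dp dp' : List Int) (t m cur : Int)
    (hs : ∀ p ∈ segs, 1 ≤ p.1 ∧ 0 ≤ p.2) (hm : 1 ≤ m)
    (hcur : cur = dp'.getD m.toNat 0)
    (hagree : ∀ s : Nat, s ≠ m.toNat → dp'.getD s 0 = dp.getD s 0) :
    (segs.map (rTerm dp' t (m + 1))).sum =
      (segs.map (rTerm dp t m)).sum + (segs.map (sTerm m cur t)).sum := by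
  rw [← List.sum_map_add]
  apply congrArg
  apply List.map_congr_left
  intro p hp
  obtain ⟨hp1, hp2⟩ := hs p hp
  unfold rTerm sTerm
  have key1 :
      (if 1 ≤ t - p.1 ∧ t - p.1 < m + 1 then dp'.getD (t - p.1).toNat 0 else 0) =
      (if 1 ≤ t - p.1 ∧ t - p.1 < m then dp.getD (t - p.1).toNat 0 else 0) +
      (if t = m + p.1 then cur else 0) := by
    by_cases he : t - p.1 = m
    · rw [if_pos (by omega), if_neg (by omega), if_pos (by omega),
        show (t - p.1).toNat = m.toNat by omega, ← hcur]
      ring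
    · rw [if_neg (by omega : ¬ t = m + p.1)]
      by_cases hc : 1 ≤ t - p.1 ∧ t - p.1 < m
      · rw [if_pos (by omega), if_pos hc, hagree _ (by omega)]
        ring
      · rw [if_neg (by omega), if_neg hc]
        ring
  have key2 :
      (if 1 ≤ t - p.2 - 1 ∧ t - p.2 - 1 < m + 1 then dp'.getD (t - p.2 - 1).toNat 0 else 0) =
      (if 1 ≤ t - p.2 - 1 ∧ t - p.2 - 1 < m then dp.getD (t - p.2 - 1).toNat 0 else 0) +
      (if t = m + p.2 + 1 then cur else 0) := by
    by_cases he : t - p.2 - 1 = m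
    · rw [if_pos (by omega), if_neg (by omega), if_pos (by omega),
        show (t - p.2 - 1).toNat = m.toNat by omega, ← hcur]
      ring
    · rw [if_neg (by omega : ¬ t = m + p.2 + 1)]
      by_cases hc : 1 ≤ t - p.2 - 1 ∧ t - p.2 - 1 < m
      · rw [if_pos (by omega), if_pos hc, hagree _ (by omega)]
        ring
      · rw [if_neg (by omega), if_neg hc]
        ring
  rw [key1, key2]
  ring

-- the bundled invariant
def InvP (n : Int) (segs : List (Int × Int)) (m : Int) : Prop :=
  (AState n segs m).length = (n + 1).toNat ∧
  (BState n segs m).1.length = (n + 1).toNat ∧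
  (AState n segs m).getD 0 0 = 0 ∧
  (AState n segs m).getD 1 0 = 1 ∧
  (∀ t : Int, 2 ≤ t → m ≤ t → (AState n segs m).getD t.toNat 0 = 0) ∧
  ((BState n segs m).2 = if m = 1 then 0 else (AState n segs m).getD (m - 1).toNat 0) ∧
  (∀ t : Int, m ≤ t → t ≤ n → (BState n segs m).1.getD t.toNat 0 = (segs.map (rTerm (AState n segs m) t m)).sum)

theorem AState_one (n : Int) (segs : List (Int × Int)) :
    AState n segs 1 = (List.replicate (n + 1).toNat 0).set 1 1 := by
  unfold AState
  rw [PySem.List.pyRange_one_eq_nil (by norm_num : (1:Int) ≤ 2), List.foldl_nil,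
      PySem.List.pySetD_of_nonneg _ _ (by norm_num : (0:Int) ≤ 1)]
  norm_num

theorem AState_two (n : Int) (segs : List (Int × Int)) :
    AState n segs 2 = AState n segs 1 := by
  unfold AState
  rw [PySem.List.pyRange_one_eq_nil (by norm_num : (2:Int) ≤ 2),
      PySem.List.pyRange_one_eq_nil (by norm_num : (1:Int) ≤ 2)]

theorem AState_succ (n : Int) (segs : List (Int × Int)) (m : Int) (hm : 2 ≤ m) :
    AState n segs (m + 1) = AStep segs (AState n segs m) m := by
  unfold AState
  rw [PySem.List.pyRange_one_succ_right (by omega : (2:Int) ≤ m), List.foldl_append,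
      List.foldl_cons, List.foldl_nil]

theorem BState_one (n : Int) (segs : List (Int × Int)) :
    BState n segs 1 = (List.replicate (n + 1).toNat 0, 0) := by
  unfold BState
  rw [PySem.List.pyRange_one_eq_nil (by norm_num : (1:Int) ≤ 1), List.foldl_nil]

theorem BState_succ (n : Int) (segs : List (Int × Int)) (m : Int) (hm : 1 ≤ m) :
    BState n segs (m + 1) = BStep n segs (BState n segs m) m := by
  unfold BState
  rw [PySem.List.pyRange_one_succ_right (by omega : (1:Int) ≤ m), List.foldl_append,
      List.foldl_cons, List.foldl_nil]

theorem inv_holds (n : Int) (segs : List (Int × Int)) (hn : 1 ≤ n)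
    (hs : ∀ p ∈ segs, 1 ≤ p.1 ∧ 0 ≤ p.2) :
    ∀ m : Int, 1 ≤ m → m ≤ n + 1 → InvP n segs m := by
  intro m hm
  induction m, hm using Int.le_induction with
  | base =>
    intro _
    unfold InvP
    rw [AState_one, BState_one]
    have h1l : 1 < (List.replicate (n + 1).toNat (0 : Int)).length := by
      simp only [List.length_replicate]; omega
    refine ⟨by simp, by simp, ?_, ?_, ?_, ?_, ?_⟩
    · rw [getD_set_of_ne _ _ _ _ (by omega), getD_replicate_zero]
    · rw [getD_set_self _ _ _ h1l]
    · intro t ht2 htm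
      rw [getD_set_of_ne _ _ _ _ (by omega), getD_replicate_zero]
    · simp
    · intro t htm htn
      rw [getD_replicate_zero]
      symm
      apply List.sum_eq_zero
      intro x hx
      obtain ⟨p, hp, rfl⟩ := List.mem_map.mp hx
      unfold rTerm
      rw [if_neg (by omega), if_neg (by omega)]
      ring
  | succ m hm ih =>
    intro hm1
    obtain ⟨ih1, ih2, ih3, ih4, ih5, ih6, ih7⟩ := ih (by omega)
    -- the A-side step: the new state's length, agreement off index m, and the value at m
    have hA : (AState n segs (m + 1)).length = (n + 1).toNat ∧
        (∀ t : Nat, t ≠ m.toNat → (AState n segs (m + 1)).getD t 0 = (AState n segs m).getD t 0) ∧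
        (AState n segs (m + 1)).getD m.toNat 0 =
          (if m = 1 then 1 else ((segs.map (gTerm (AState n segs m) m)).sum) % 998244353) := by
      by_cases hm2 : m = 1
      · subst hm2
        rw [show (1 : Int) + 1 = 2 by norm_num, AState_two]
        refine ⟨ih1, fun t ht => rfl, ?_⟩
        rw [if_pos rfl, show (1 : Int).toNat = 1 by decide]
        exact ih4
      · have h2m : (2 : Int) ≤ m := by omega
        rw [AState_succ n segs m h2m]
        have hv0 : (AState n segs m).getD m.toNat 0 = 0 := ih5 m h2m le_rfl
        have hlen : m.toNat < (AState n segs m).length := by rw [ih1]; omega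
        obtain ⟨a1, a2, a3⟩ := AStep_spec m segs (AState n segs m) hs h2m hlen
          (by rw [hv0]) (by rw [hv0]; norm_num)
        refine ⟨by rw [a1, ih1], a2, ?_⟩
        rw [a3, hv0, if_neg hm2, zero_add]
    obtain ⟨a1, a2, a3⟩ := hA
    -- the B-side step
    have hBs : BState n segs (m + 1) =
        (segs.foldl (fScat n m (if m = 1 then 1 else
            PySem.Int.mod (PySem.List.pyGetD (BState n segs m).1 m 0) 998244353)) (BState n segs m).1,
          (if m = 1 then 1 else
            PySem.Int.mod (PySem.List.pyGetD (BState n segs m).1 m 0) 998244353)) := by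
      rw [BState_succ n segs m (by omega)]
      rfl
    -- the scattered value is exactly the value A just finalized at index m
    have hc : (if m = 1 then (1 : Int) else
        PySem.Int.mod (PySem.List.pyGetD (BState n segs m).1 m 0) 998244353) =
        (AState n segs (m + 1)).getD m.toNat 0 := by
      by_cases hm2 : m = 1
      · rw [if_pos hm2, a3, if_pos hm2]
      · rw [if_neg hm2, a3, if_neg hm2,
            pyGetD0 _ _ (by omega : (0 : Int) ≤ m),
            PySem.Int.mod_eq_emod_of_pos (by norm_num : (0 : Int) < 998244353),
            ih7 m le_rfl (by omega),
            rsum_eq_gsum segs (AState n segs m) m hs ih3]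
    obtain ⟨b1, b2⟩ := BScat_spec n m (if m = 1 then 1 else
        PySem.Int.mod (PySem.List.pyGetD (BState n segs m).1 m 0) 998244353) segs
      (BState n segs m).1 hs (by omega) hn ih2
    unfold InvP
    rw [hBs]
    refine ⟨a1, by rw [b1]; exact ih2, ?_, ?_, ?_, ?_, ?_⟩
    · rw [a2 0 (by omega)]
      exact ih3
    · by_cases hm2 : m = 1
      · have he : (1 : Nat) = m.toNat := by omega
        rw [he, a3, if_pos hm2]
      · rw [a2 1 (by omega)]
        exact ih4
    · intro t ht2 htm
      rw [a2 t.toNat (by omega)]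
      exact ih5 t ht2 (by omega)
    · rw [if_neg (by omega : ¬ m + 1 = 1), show m + 1 - 1 = m by ring]
      exact hc
    · intro t htm htn
      rw [b2 t (by omega) htn, ih7 t (by omega) htn]
      exact (rsum_step segs (AState n segs m) (AState n segs (m + 1)) t m _ hs (by omega) hc a2).symm

-- ===== VERDICT (by name: the statement is the Claim_ definition above) =====
theorem f_spec : Claim_equal_f := by
  intro n k ls hdom hpre
  unfold Pre_f at hpre
  obtain ⟨hn, hk, hs⟩ := hpre
  unfold Spec_f
  rw [f_eq_AState n k ls hk, f_alt_eq_BState n k ls hk]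
  obtain ⟨i1, i2, i3, i4, i5, i6, i7⟩ := inv_holds n (ls.take k.toNat) hn hs (n + 1) (by omega) le_rfl
  rw [pyGetD0 _ _ (by omega : (0 : Int) ≤ n), i6, if_neg (by omega : ¬ n + 1 = 1),
      show n + 1 - 1 = n by ring]
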